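-- pv_equiv track=rewrite | github.com/ayhem18/pytorch_modular | src/mypt/building_blocks/conv_blocks/conv_block_design/expanding_designer.py | _split_into_sub_blocks
-- ===== SOURCE A (Python) =====
-- from typing import Dict, List, OrderedDict, Tuple
--
-- def _split_into_sub_blocks(block: List[Dict]) -> List[List[Dict]]:
--     """
--     Split a block into sub-blocks based on layer types.
--     A sub-block is defined as a sequence of transpose convolutions with stride=1
--     followed by a transpose convolution with stride>1.
--
--     Args:
--         block: The block to split
--
--     Returns:
--         List of sub-blocks
--     """
--     sub_blocks = []
--     current_sub_block = []
--
--     for layer in block: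
--         # if the layer has a stride larger than 1 or it has a end_block flag, it is the end of a sub-block
--         if layer["stride"] > 1 or layer.get("end_block", False):
--             # Add the strided transpose conv to the current sub-block
--             current_sub_block.append(layer)
--
--             # Finalize the sub-block and start a new one
--             sub_blocks.append(current_sub_block)
--             current_sub_block = []
--         else:
--             # Regular transpose conv - add to current sub-block
--             current_sub_block.append(layer)
--
--     # Add the last sub-block if it exists
--     if current_sub_block:
--         sub_blocks.append(current_sub_block)
--
--     return sub_blocks
-- ===== SOURCE B (Python) =====
-- def _split_into_sub_blocks(block):
--     """Recursive decomposition: cut off the prefix up to and including the first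
--     boundary layer (stride>1 or end_block) by slicing, recurse on the rest."""
--     if not block:
--         return []
--     for i, layer in enumerate(block):
--         if layer["stride"] > 1 or layer.get("end_block", False):
--             return [block[:i + 1]] + _split_into_sub_blocks(block[i + 1:])
--     return [block]
-- ===== Notes on version B (the rewrite author's own statement) =====
-- stated objective: alternative
-- what changed: Replaces A's single fold with a running buffer and accumulator by a recursive decomposition: find the first boundary layer, emit the slice up to and including it, and recurse on the remaining slice (no buffer is maintained).
import Mathlib
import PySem

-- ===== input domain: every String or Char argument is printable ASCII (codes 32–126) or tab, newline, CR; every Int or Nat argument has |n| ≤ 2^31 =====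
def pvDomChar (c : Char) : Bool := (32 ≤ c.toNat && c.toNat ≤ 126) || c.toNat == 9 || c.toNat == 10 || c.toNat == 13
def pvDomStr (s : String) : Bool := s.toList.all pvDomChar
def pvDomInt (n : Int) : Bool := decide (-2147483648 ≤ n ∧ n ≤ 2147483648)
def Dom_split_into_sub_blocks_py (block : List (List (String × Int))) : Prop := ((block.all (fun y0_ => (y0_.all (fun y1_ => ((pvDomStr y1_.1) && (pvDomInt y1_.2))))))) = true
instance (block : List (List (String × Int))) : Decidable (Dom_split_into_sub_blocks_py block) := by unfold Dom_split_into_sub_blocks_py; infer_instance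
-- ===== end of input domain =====

-- B replaces A's fold-with-running-buffer by a recursive slice-off-the-first-boundary decomposition (alternative, same cost).

-- ===== PORT A =====
-- layer["stride"] > 1 or layer.get("end_block", False): first-match assoc lookup; under
-- Pre_ the "stride" key is present, so the getD 0 default is never consulted for it;
-- .get("end_block", False) defaults to 0 (False), truthiness of an int value = ≠ 0.
def pvIsBoundary (layer : List (String × Int)) : Bool :=
  decide (1 < (List.lookup "stride" layer).getD 0) || ((List.lookup "end_block" layer).getD 0 != 0)

def pvGoA (block : List (List (String × Int))) (sub_blocks : List (List (List (String × Int))))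
    (current_sub_block : List (List (String × Int))) : List (List (List (String × Int))) :=
  match block with
  | [] => if current_sub_block.isEmpty then sub_blocks else sub_blocks ++ [current_sub_block]
  | layer :: rest =>
    if pvIsBoundary layer then
      pvGoA rest (sub_blocks ++ [current_sub_block ++ [layer]]) []
    else
      pvGoA rest sub_blocks (current_sub_block ++ [layer])

def split_into_sub_blocks_py (block : List (List (String × Int))) : List (List (List (String × Int))) :=
  pvGoA block [] []

-- ===== PORT B =====
-- index of the first boundary layer (the enumerate loop of Source B)
def pvFindBoundary (block : List (List (String × Int))) : Option Nat :=
  match block with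
  | [] => none
  | layer :: rest => if pvIsBoundary layer then some 0 else (pvFindBoundary rest).map (· + 1)

-- block[:i+1] / block[i+1:] with 0 ≤ i+1 ≤ len(block) are exactly take/drop (i+1)
def split_into_sub_blocks_py_alt (block : List (List (String × Int))) : List (List (List (String × Int))) :=
  match block with
  | [] => []
  | x :: xs =>
    match pvFindBoundary (x :: xs) with
    | some i => ((x :: xs).take (i + 1)) :: split_into_sub_blocks_py_alt ((x :: xs).drop (i + 1))
    | none => [x :: xs]
termination_by block.length
decreasing_by simp

-- ===== PRECONDITION & SPEC =====
-- Pre_ excludes exactly the inputs where Python A raises KeyError: a layer without a "stride" key.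
def Pre_split_into_sub_blocks_py (block : List (List (String × Int))) : Prop :=
  (block.all (fun layer => (List.lookup "stride" layer).isSome)) = true
instance (block : List (List (String × Int))) : Decidable (Pre_split_into_sub_blocks_py block) := by unfold Pre_split_into_sub_blocks_py; infer_instance

def pvWitness_split_into_sub_blocks_py : (List (List (String × Int))) :=
  [[("stride", 1)], [("stride", 2)], [("stride", 1), ("end_block", 1)]]

def Spec_split_into_sub_blocks_py (block : List (List (String × Int))) (out : List (List (List (String × Int)))) : Prop := out = split_into_sub_blocks_py_alt block
instance (block : List (List (String × Int))) (out : List (List (List (String × Int)))) : Decidable (Spec_split_into_sub_blocks_py block out) := by unfold Spec_split_into_sub_blocks_py; infer_instance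

-- ===== CLAIM (what is proved, stated in full; the proofs are below) =====
def Claim_equal_split_into_sub_blocks_py : Prop := ∀ (block : List (List (String × Int))), Dom_split_into_sub_blocks_py block → Pre_split_into_sub_blocks_py block → Spec_split_into_sub_blocks_py block (split_into_sub_blocks_py block)

-- ===== LEMMAS AND PROOFS =====

-- prepend a pending buffer onto the first chunk of a chunk list
def pvPrep (cur : List (List (String × Int))) (cs : List (List (List (String × Int)))) : List (List (List (String × Int))) :=
  match cs with
  | [] => if cur.isEmpty then [] else [cur]
  | c :: cs' => (cur ++ c) :: cs'

theorem pvPrep_nil (cs : List (List (List (String × Int)))) : pvPrep [] cs = cs := by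
  cases cs <;> simp [pvPrep]

theorem pvAlt_nil : split_into_sub_blocks_py_alt [] = [] := by
  rw [split_into_sub_blocks_py_alt.eq_def]

theorem pvAlt_cons (x : List (String × Int)) (xs : List (List (String × Int))) :
    split_into_sub_blocks_py_alt (x :: xs) =
      match pvFindBoundary (x :: xs) with
      | some i => ((x :: xs).take (i + 1)) :: split_into_sub_blocks_py_alt ((x :: xs).drop (i + 1))
      | none => [x :: xs] := by
  rw [split_into_sub_blocks_py_alt.eq_def]

-- pushing a non-boundary layer into the pending buffer commutes with B's decomposition
theorem pvPrep_step (x : List (String × Int)) (xs : List (List (String × Int)))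
    (cur : List (List (String × Int))) (hb : ¬ pvIsBoundary x = true) :
    pvPrep (cur ++ [x]) (split_into_sub_blocks_py_alt xs) =
      pvPrep cur (split_into_sub_blocks_py_alt (x :: xs)) := by
  have hfind : pvFindBoundary (x :: xs) = (pvFindBoundary xs).map (· + 1) := by
    simp [pvFindBoundary, hb]
  cases hxs : pvFindBoundary xs with
  | none =>
    cases xs with
    | nil => rw [pvAlt_cons, hfind, hxs, pvAlt_nil]; simp [pvPrep]
    | cons y ys =>
      rw [pvAlt_cons y ys, hxs, pvAlt_cons x (y :: ys), hfind, hxs]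
      simp [pvPrep]
  | some i =>
    have hxsne : xs ≠ [] := by
      intro h; rw [h] at hxs; simp [pvFindBoundary] at hxs
    obtain ⟨y, ys, rfl⟩ := List.exists_cons_of_ne_nil hxsne
    rw [pvAlt_cons x (y :: ys), hfind, hxs, pvAlt_cons y ys, hxs]
    simp only [Option.map_some, List.take_succ_cons, List.drop_succ_cons]
    simp [pvPrep]

-- loop invariant of A's fold: the accumulated state relates to B's chunk list
theorem pvGoA_eq_prep (block : List (List (String × Int))) :
    ∀ (subs : List (List (List (String × Int)))) (cur : List (List (String × Int))),
    pvGoA block subs cur = subs ++ pvPrep cur (split_into_sub_blocks_py_alt block) := by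
  induction block with
  | nil =>
    intro subs cur
    rw [pvAlt_nil]
    simp only [pvGoA, pvPrep]
    split <;> simp
  | cons x xs ih =>
    intro subs cur
    by_cases hb : pvIsBoundary x
    · have hfind : pvFindBoundary (x :: xs) = some 0 := by simp [pvFindBoundary, hb]
      rw [pvAlt_cons, hfind]
      simp only [pvGoA, hb, if_true]
      rw [ih, pvPrep_nil]
      simp [pvPrep]
    · simp only [pvGoA, hb, Bool.false_eq_true, if_false]
      rw [ih, pvPrep_step x xs cur hb]

-- ===== VERDICT (by name: the statement is the Claim_ definition above) =====
theorem split_into_sub_blocks_py_spec : Claim_equal_split_into_sub_blocks_py := by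
  intro block _ _
  unfold Spec_split_into_sub_blocks_py split_into_sub_blocks_py
  rw [pvGoA_eq_prep, pvPrep_nil]
  simp
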